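-- pv_equiv track=rewrite | github.com/BelfodilAimene/CbOImplications | hmtData.py | get_items_from_hmt_item
-- ===== SOURCE A (Python) =====
-- def get_items_from_hmt_item(hmt_item):
--     if len(hmt_item)==0:
--         return frozenset()
--     splitted = hmt_item.split(".")
--     prefix = splitted[0]
--     result = set([prefix])
--     for element in splitted[1:]:
--         prefix+="."+element
--         result.add(prefix)
--     return result
-- ===== SOURCE B (Python) =====
-- def get_items_from_hmt_item(hmt_item):
--     if len(hmt_item) == 0:
--         return frozenset()
--     result = {hmt_item[:i] for i, c in enumerate(hmt_item) if c == '.'}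
--     result.add(hmt_item)
--     return result
-- ===== Notes on version B (the rewrite author's own statement) =====
-- stated objective: idiomatic
-- what changed: Instead of splitting on '.' and threading a growing prefix accumulator through the parts, B scans the raw string for dot positions and takes the set of slices at those positions plus the full string.
import Mathlib
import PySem

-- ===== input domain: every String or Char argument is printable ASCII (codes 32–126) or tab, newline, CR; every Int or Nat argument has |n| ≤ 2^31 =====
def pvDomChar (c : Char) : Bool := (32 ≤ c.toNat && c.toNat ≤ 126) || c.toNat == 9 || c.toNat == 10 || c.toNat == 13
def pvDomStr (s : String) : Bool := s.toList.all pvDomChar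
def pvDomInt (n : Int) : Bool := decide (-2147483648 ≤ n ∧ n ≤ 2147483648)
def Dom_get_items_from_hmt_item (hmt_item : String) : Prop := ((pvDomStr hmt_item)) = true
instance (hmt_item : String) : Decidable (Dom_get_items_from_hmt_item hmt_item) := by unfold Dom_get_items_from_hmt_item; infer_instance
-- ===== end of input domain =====

-- B scans the raw string for dot positions and collects the slices there plus the full
-- string, instead of splitting on '.' and threading a growing prefix accumulator (idiomatic).


-- ===== PORT A =====
-- literal transliteration of A: split on ".", seed the set with the first part,
-- then fold over the remaining parts extending the running prefix and adding it.
def get_items_from_hmt_item (hmt_item : String) : List String :=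
  if PySem.Str.len hmt_item = 0 then []   -- frozenset()
  else
    let splitted := (PySem.Str.split? hmt_item ".").getD []   -- sep ≠ "", never none
    let prefix0 := PySem.List.pyGetD splitted 0 ""            -- splitted[0]; split is never empty
    let result : PySem.Set String := PySem.Set.ofList [prefix0]
    let st := (PySem.List.slice splitted (some 1) none).foldl
      (fun (st : String × PySem.Set String) element =>
        let p := st.1 ++ "." ++ element
        (p, PySem.Set.add st.2 p)) (prefix0, result)
    st.2

-- ===== PORT B =====
-- literal transliteration of B: set comprehension over enumerate(hmt_item) collecting
-- the slice hmt_item[:i] at each dot, then add the full string.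
def get_items_from_hmt_item_alt (hmt_item : String) : List String :=
  if PySem.Str.len hmt_item = 0 then []   -- frozenset()
  else
    let result : PySem.Set String := PySem.Set.ofList
      ((PySem.List.enumerate hmt_item.toList).filterMap
        (fun ic => if ic.2 = '.' then some (PySem.Str.slice hmt_item none (some ic.1)) else none))
    PySem.Set.add result hmt_item

-- ===== PRECONDITION & SPEC =====
def Spec_get_items_from_hmt_item (hmt_item : String) (out : List String) : Prop := out = get_items_from_hmt_item_alt hmt_item
instance (hmt_item : String) (out : List String) : Decidable (Spec_get_items_from_hmt_item hmt_item out) := by unfold Spec_get_items_from_hmt_item; infer_instance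

-- ===== CLAIM (what is proved, stated in full; the proofs are below) =====
def Claim_equal_get_items_from_hmt_item : Prop := ∀ (hmt_item : String), Dom_get_items_from_hmt_item hmt_item → Spec_get_items_from_hmt_item hmt_item (get_items_from_hmt_item hmt_item)

-- ===== LEMMAS AND PROOFS =====

-- split of a char list on '.', returned as (first part, remaining parts)
def dsplit : List Char → List Char × List (List Char)
  | [] => ([], [])
  | c :: rest =>
    if c = '.' then ([], (dsplit rest).1 :: (dsplit rest).2)
    else (c :: (dsplit rest).1, (dsplit rest).2)

-- prefixes of cs ending just before each dot (char level, without the full string)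
def dprefD : List Char → List (List Char)
  | [] => []
  | c :: rest => (if c = '.' then [[]] else []) ++ (dprefD rest).map (c :: ·)

-- running dotted prefixes of pfx through parts ps (char level), full result list
def jprefC : List Char → List (List Char) → List (List Char)
  | pfx, [] => [pfx]
  | pfx, e :: es => pfx :: jprefC (pfx ++ '.' :: e) es

-- running dotted prefixes, string level, tail only (what A's fold appends)
def tjS : String → List String → List String
  | _, [] => []
  | pfx, e :: es => (pfx ++ "." ++ e) :: tjS (pfx ++ "." ++ e) es

theorem go_spec (fuel : Nat) : ∀ (l cur : List Char) (acc : List (List Char)),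
    l.length ≤ fuel →
    PySem.Chars.splitOn.go ['.'] fuel l cur acc
      = acc.reverse ++ ((cur.reverse ++ (dsplit l).1) :: (dsplit l).2) := by
  induction fuel with
  | zero =>
    intro l cur acc h
    have : l = [] := List.eq_nil_of_length_eq_zero (Nat.le_zero.mp h)
    subst this
    simp [PySem.Chars.splitOn.go, dsplit]
  | succ fuel ih =>
    intro l cur acc h
    cases l with
    | nil => simp [PySem.Chars.splitOn.go, dsplit]
    | cons c rest =>
      rw [PySem.Chars.splitOn.go.eq_def]
      simp only []
      by_cases hc : c = '.'
      · subst hc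
        have hp : List.isPrefixOf ['.'] ('.' :: rest) = true := by simp [List.isPrefixOf]
        simp only [hp, if_true, List.length_cons, List.drop_succ_cons, List.length_nil, List.drop_zero]
        rw [ih rest [] (cur.reverse :: acc) (by simpa using Nat.le_of_succ_le_succ (by simpa using h))]
        simp [dsplit]
      · have hp : List.isPrefixOf ['.'] (c :: rest) = false := by
          simp [List.isPrefixOf]; exact fun hh => hc hh.symm
        simp only [hp, Bool.false_eq_true, if_false]
        rw [ih rest (c :: cur) acc (by simpa using Nat.le_of_succ_le_succ (by simpa using h))]
        simp [dsplit, hc]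

theorem splitOn_eq_dsplit (cs : List Char) :
    PySem.Chars.splitOn cs ['.'] = (dsplit cs).1 :: (dsplit cs).2 := by
  rw [show PySem.Chars.splitOn cs ['.'] = PySem.Chars.splitOn.go ['.'] (cs.length + 1) cs [] [] from rfl]
  rw [go_spec (cs.length + 1) cs [] [] (by omega)]
  simp

theorem jprefC_dsplit (cs : List Char) : ∀ (pfx : List Char),
    jprefC (pfx ++ (dsplit cs).1) (dsplit cs).2
      = ((dprefD cs) ++ [cs]).map (pfx ++ ·) := by
  induction cs with
  | nil => intro pfx; simp [dsplit, dprefD, jprefC]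
  | cons c rest ih =>
    intro pfx
    by_cases hc : c = '.'
    · subst hc
      simp only [dsplit, dprefD]
      show jprefC (pfx ++ []) ((dsplit rest).1 :: (dsplit rest).2) = _
      rw [List.append_nil, jprefC]
      have := ih (pfx ++ ['.'])
      rw [show pfx ++ ['.'] ++ (dsplit rest).1 = pfx ++ ('.' :: (dsplit rest).1) by simp] at this
      rw [this]
      simp [Function.comp_def, List.map_map]
    · simp only [dsplit, if_neg hc, dprefD]
      have := ih (pfx ++ [c])
      rw [show pfx ++ [c] ++ (dsplit rest).1 = pfx ++ (c :: (dsplit rest).1) by simp] at this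
      rw [this]
      simp [Function.comp_def, List.map_map]

theorem tjS_eq (ps : List (List Char)) : ∀ (pfx : List Char),
    String.ofList pfx :: tjS (String.ofList pfx) (ps.map String.ofList)
      = (jprefC pfx ps).map String.ofList := by
  induction ps with
  | nil => intro pfx; simp [tjS, jprefC]
  | cons e es ih =>
    intro pfx
    have key : String.ofList pfx ++ "." ++ String.ofList e = String.ofList (pfx ++ '.' :: e) := by
      have h2 : (String.ofList pfx ++ "." ++ String.ofList e).toList
          = (String.ofList (pfx ++ '.' :: e)).toList := by
        simp [String.toList_append, String.toList_ofList]
      exact String.toList_inj.mp h2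
    simp only [List.map_cons, tjS, jprefC, List.map]
    rw [key, ih (pfx ++ '.' :: e)]

theorem foldA (es : List String) : ∀ (pfx : String) (S : List String),
    (∀ x ∈ S, x.toList.length ≤ pfx.toList.length) →
    ((es.foldl (fun (st : String × PySem.Set String) element =>
        let p := st.1 ++ "." ++ element
        (p, PySem.Set.add st.2 p)) (pfx, S)).2) = S ++ tjS pfx es := by
  induction es with
  | nil => intro pfx S h; simp [tjS]
  | cons e es ih =>
    intro pfx S h
    simp only [List.foldl, tjS]
    have hlen : (pfx ++ "." ++ e).toList.length = pfx.toList.length + 1 + e.toList.length := by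
      simp [String.toList_append]; omega
    have hnot : (pfx ++ "." ++ e) ∉ S := by
      intro hm
      have := h _ hm
      rw [hlen] at this; omega
    have hadd : PySem.Set.add S (pfx ++ "." ++ e) = S ++ [pfx ++ "." ++ e] := by
      simp [PySem.Set.add, PySem.Set.contains, hnot]
    rw [hadd, ih (pfx ++ "." ++ e) (S ++ [pfx ++ "." ++ e]) ?_]
    · simp
    · intro x hx
      rcases List.mem_append.mp hx with hx | hx
      · have := h _ hx; rw [hlen]; omega
      · simp at hx; subst hx; rfl

theorem dprefD_length_lt (cs : List Char) : ∀ x ∈ dprefD cs, x.length < cs.length := by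
  induction cs with
  | nil => simp [dprefD]
  | cons c rest ih =>
    intro x hx
    simp only [dprefD, List.mem_append] at hx
    rcases hx with hx | hx
    · by_cases hc : c = '.' <;> simp [hc] at hx
      subst hx; simp
    · rcases List.mem_map.mp hx with ⟨y, hy, rfl⟩
      have := ih y hy; simpa using Nat.succ_lt_succ this

theorem dprefD_pairwise (cs : List Char) :
    (dprefD cs).Pairwise (fun a b => a.length < b.length) := by
  induction cs with
  | nil => simp [dprefD]
  | cons c rest ih =>
    simp only [dprefD]
    apply List.pairwise_append.mpr
    refine ⟨?_, ?_, ?_⟩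
    · by_cases hc : c = '.' <;> simp [hc]
    · exact ih.map _ (by intro a b hab; simpa using Nat.succ_lt_succ hab)
    · intro a ha b hb
      by_cases hc : c = '.' <;> simp [hc] at ha
      subst ha
      rcases List.mem_map.mp hb with ⟨y, hy, rfl⟩
      simp

theorem enum_filterMap (cs : List Char) : ∀ (pre : List Char),
    (PySem.List.enumerate cs ((pre.length : Int))).filterMap
        (fun ic => if ic.2 = '.' then some (PySem.List.slice (pre ++ cs) none (some ic.1)) else none)
      = (dprefD cs).map (pre ++ ·) := by
  induction cs with
  | nil => intro pre; simp [PySem.List.enumerate, dprefD]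
  | cons c rest ih =>
    intro pre
    rw [show (PySem.List.enumerate (c :: rest) ((pre.length : Int)))
        = ((pre.length : Int), c) :: PySem.List.enumerate rest ((pre.length : Int) + 1) from rfl]
    rw [List.filterMap_cons]
    have hstep : (PySem.List.enumerate rest ((pre.length : Int) + 1)).filterMap
        (fun ic => if ic.2 = '.' then some (PySem.List.slice (pre ++ c :: rest) none (some ic.1)) else none)
      = (dprefD rest).map ((pre ++ [c]) ++ ·) := by
      have := ih (pre ++ [c])
      rw [show ((((pre ++ [c]).length : Nat) : Int)) = ((pre.length : Int) + 1) by simp] at this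
      rw [show (pre ++ [c]) ++ rest = pre ++ c :: rest by simp] at this
      exact this
    by_cases hc : c = '.'
    · subst hc
      have hsl : PySem.List.slice (pre ++ '.' :: rest) none (some ((pre.length : Int))) = pre := by
        rw [PySem.List.slice_to_natCast]
        simp
      simp [dprefD, hsl, hstep, Function.comp_def, List.map_map]
    · simp only [dprefD, if_neg hc]
      rw [hstep]
      simp [Function.comp_def, List.map_map]

theorem ofList_add_of_nodup {α : Type} [BEq α] [LawfulBEq α]
    (l : List α) : ∀ (S : List α), (S ++ l).Nodup →
    l.foldl PySem.Set.add S = S ++ l := by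
  induction l with
  | nil => intro S h; simp
  | cons x l ih =>
    intro S h
    have hx : x ∉ S := by
      intro hm
      exact (List.disjoint_of_nodup_append h) hm (by simp)
    have hadd : PySem.Set.add S x = S ++ [x] := by
      simp [PySem.Set.add, PySem.Set.contains, hx]
    simp only [List.foldl, hadd]
    rw [ih (S ++ [x]) (by simpa using h)]
    simp

theorem ofList_injective : Function.Injective String.ofList := by
  intro a b h
  have := congrArg String.toList h
  simpa [String.toList_ofList] using this

-- ===== VERDICT (by name: the statement is the Claim_ definition above) =====
theorem get_items_from_hmt_item_spec : Claim_equal_get_items_from_hmt_item := by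
  intro s _
  unfold Spec_get_items_from_hmt_item
  by_cases hnil : s.toList = []
  · simp [get_items_from_hmt_item, get_items_from_hmt_item_alt, PySem.Str.len, hnil]
  · have hlen : ¬ (PySem.Str.len s = 0) := by
      simp only [PySem.Str.len, Nat.cast_eq_zero, List.length_eq_zero_iff]
      exact hnil
    set cs := s.toList with hcs
    -- A side
    have hsplit : (PySem.Str.split? s ".").getD []
        = String.ofList (dsplit cs).1 :: ((dsplit cs).2.map String.ofList) := by
      simp [PySem.Str.split?, PySem.Chars.split?, splitOn_eq_dsplit, ← hcs]
    have hA : get_items_from_hmt_item s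
        = ((dprefD cs) ++ [cs]).map String.ofList := by
      rw [get_items_from_hmt_item, if_neg hlen]
      simp only [hsplit]
      have hp0 : PySem.List.pyGetD
          (String.ofList (dsplit cs).1 :: ((dsplit cs).2.map String.ofList)) 0 ""
          = String.ofList (dsplit cs).1 := by
        simp [PySem.List.pyGetD, PySem.List.pyGet?, PySem.List.pyIdx?]
      rw [hp0, PySem.List.slice_from_one]
      have hof1 : PySem.Set.ofList [String.ofList (dsplit cs).1]
          = [String.ofList (dsplit cs).1] := by
        simp [PySem.Set.ofList_eq_foldl, PySem.Set.add, PySem.Set.contains]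
      rw [hof1]
      rw [List.tail_cons]
      rw [foldA ((dsplit cs).2.map String.ofList) (String.ofList (dsplit cs).1)
            [String.ofList (dsplit cs).1] (by intro x hx; simp at hx; subst hx; rfl)]
      rw [show ([String.ofList (dsplit cs).1] : List String) ++ _
            = String.ofList (dsplit cs).1
              :: tjS (String.ofList (dsplit cs).1) ((dsplit cs).2.map String.ofList) from rfl]
      rw [tjS_eq]
      have := jprefC_dsplit cs []
      simp only [List.nil_append] at this
      rw [this]
      simp
    -- B side
    have hB : get_items_from_hmt_item_alt s
        = ((dprefD cs).map String.ofList) ++ [s] := by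
      rw [get_items_from_hmt_item_alt, if_neg hlen]
      have hfm : (PySem.List.enumerate s.toList).filterMap
          (fun ic => if ic.2 = '.' then some (PySem.Str.slice s none (some ic.1)) else none)
          = (dprefD cs).map String.ofList := by
        have hE := enum_filterMap cs []
        simp only [List.length_nil, Nat.cast_zero, List.nil_append] at hE
        calc (PySem.List.enumerate s.toList).filterMap
              (fun ic => if ic.2 = '.' then some (PySem.Str.slice s none (some ic.1)) else none)
            = (PySem.List.enumerate cs 0).filterMap
              (fun ic => Option.map String.ofList
                (if ic.2 = '.' then some (PySem.List.slice cs none (some ic.1)) else none)) := by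
              rw [← hcs]
              congr 1
              funext ic
              by_cases h : ic.2 = '.' <;> simp [h, PySem.Str.slice, PySem.Chars.slice, ← hcs]
          _ = ((PySem.List.enumerate cs 0).filterMap
                (fun ic => if ic.2 = '.' then some (PySem.List.slice cs none (some ic.1)) else none)).map
                String.ofList := by
              rw [List.map_filterMap]
          _ = (dprefD cs).map String.ofList := by rw [hE]; simp
      rw [hfm]
      have hndc : (dprefD cs).Nodup :=
        List.Pairwise.imp
          (fun {a b} (h : a.length < b.length) (he : a = b) => absurd (he ▸ h) (lt_irrefl _))
          (dprefD_pairwise cs)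
      have hnd : ((dprefD cs).map String.ofList).Nodup := hndc.map ofList_injective
      have hofl : PySem.Set.ofList ((dprefD cs).map String.ofList)
          = (dprefD cs).map String.ofList := by
        rw [PySem.Set.ofList_eq_foldl]
        have := ofList_add_of_nodup ((dprefD cs).map String.ofList) [] (by simpa using hnd)
        simpa using this
      rw [hofl]
      have hs_not : s ∉ (dprefD cs).map String.ofList := by
        intro hm
        rcases List.mem_map.mp hm with ⟨y, hy, he⟩
        have hl := dprefD_length_lt cs y hy
        have : y = cs := by
          have := congrArg String.toList he
          simpa [String.toList_ofList, ← hcs] using this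
        subst this; omega
      simp [PySem.Set.add, PySem.Set.contains, hs_not]
    have hofs : String.ofList cs = s := by rw [hcs]; exact String.ofList_toList
    rw [hA, hB, List.map_append]
    simp only [List.map_cons, List.map_nil, hofs]
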